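-- pv_equiv track=rewrite | github.com/Appolloyon/Rediting | polyt.py | polyT
-- ===== SOURCE A (Python) =====
-- def gulp(string, start, gulp_size):
--     """get substrings of a string"""
--     gulpstr = ''
--     chars = string[start:start+gulp_size]
--     for char in chars:
--         gulpstr += char
--     return gulpstr
--
-- def polyT(string):
--     """find stretches of 4 or more T's in a row"""
--     i = 0
--     while i <= len(string) - 4:
--         polyt = gulp(string, i, 4)
--         if polyt == 'TTTT':
--             return True
--         else:
--             pass
--         i += 1
-- ===== SOURCE B (Python) =====
-- def polyT(string):
--     """find stretches of 4 or more T's in a row"""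
--     count = 0
--     for char in string:
--         if char == 'T':
--             count += 1
--             if count == 4:
--                 return True
--         else:
--             count = 0
-- ===== Notes on version B (the rewrite author's own statement) =====
-- stated objective: faster
-- what changed: Replaces the sliding-window scan (a 4-character substring rebuilt character by character at every index and compared against the target run) with a single pass over the string keeping a run-length counter that resets on a mismatching character and reports success as soon as it reaches 4; the gulp helper disappears.
import Mathlib
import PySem

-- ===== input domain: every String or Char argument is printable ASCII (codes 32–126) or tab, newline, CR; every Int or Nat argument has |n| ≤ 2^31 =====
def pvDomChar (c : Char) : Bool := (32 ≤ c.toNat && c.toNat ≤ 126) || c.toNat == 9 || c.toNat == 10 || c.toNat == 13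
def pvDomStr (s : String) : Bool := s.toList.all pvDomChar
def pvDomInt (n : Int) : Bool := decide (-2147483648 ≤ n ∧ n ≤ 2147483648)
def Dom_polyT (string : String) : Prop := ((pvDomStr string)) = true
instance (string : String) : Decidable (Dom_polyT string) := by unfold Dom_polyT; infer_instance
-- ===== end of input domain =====

-- B replaces A's rebuilt-4-char-window scan with a single-pass run-length counter (simpler; same None-on-no-match behaviour).

-- ===== PORT A =====
def gulp (string : String) (start gulp_size : Int) : String :=
  -- gulpstr = ''; chars = string[start:start+gulp_size]; for char in chars: gulpstr += char
  let chars := PySem.Str.slice string (some start) (some (start + gulp_size))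
  chars.toList.foldl (fun gulpstr char => gulpstr.push char) ""

-- the 'while i <= len(string) - 4' loop of A
def polyTLoop (string : String) (i : Nat) : Option Bool :=
  if (i : Int) ≤ PySem.Str.len string - 4 then
    if gulp string (i : Int) 4 = "TTTT" then some true
    else polyTLoop string (i + 1)
  else none
termination_by string.toList.length - i
decreasing_by
  simp only [PySem.Str.len_eq] at *; omega

def polyT (string : String) : Option Bool := polyTLoop string 0

-- ===== PORT B =====
-- the 'for char in string' loop of B, carrying the run-length counter
def polyTAltLoop : List Char → Nat → Option Bool
  | [], _ => none
  | char :: rest, count =>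
    if char = 'T' then
      if count + 1 = 4 then some true else polyTAltLoop rest (count + 1)
    else polyTAltLoop rest 0

def polyT_alt (string : String) : Option Bool := polyTAltLoop string.toList 0

-- ===== PRECONDITION & SPEC =====
def Spec_polyT (string : String) (out : Option Bool) : Prop := out = polyT_alt string
instance (string : String) (out : Option Bool) : Decidable (Spec_polyT string out) := by
  unfold Spec_polyT; infer_instance

-- ===== CLAIM (what is proved, stated in full; the proofs are below) =====
def Claim_equal_polyT : Prop := ∀ (string : String), Dom_polyT string → Spec_polyT string (polyT string)

-- ===== LEMMAS AND PROOFS =====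

-- common reference form: scan the suffixes, succeed when the next 4 chars are T's
def pvF : List Char → Option Bool
  | [] => none
  | c :: t => if c = 'T' ∧ t.take 3 = ['T', 'T', 'T'] then some true else pvF t

theorem pvF_of_short (l : List Char) (h : l.length < 4) : pvF l = none := by
  induction l with
  | nil => rfl
  | cons c t ih =>
    simp only [pvF]
    rw [if_neg, ih (by simp at h; omega)]
    rintro ⟨-, h3⟩
    have := congrArg List.length h3
    simp at this h
    omega

theorem gulp_toList (string : String) (i : Nat) :
    (gulp string (i : Int) 4).toList = (string.toList.drop i).take 4 := by
  unfold gulp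
  have hfold : ∀ (l : List Char) (s : String),
      (l.foldl (fun gulpstr char => gulpstr.push char) s).toList = s.toList ++ l := by
    intro l
    induction l with
    | nil => simp
    | cons c t ih => intro s; simp [List.foldl, ih, String.toList_push]
  rw [hfold]
  rw [PySem.Str.toList_slice, PySem.Chars.slice_eq_listSlice,
    show ((i : Int) + 4) = ((i + 4 : Nat) : Int) by push_cast; ring,
    PySem.List.slice_natCast]
  simp

theorem polyTLoop_eq_pvF (string : String) (i : Nat) :
    polyTLoop string i = pvF (string.toList.drop i) := by
  fun_induction polyTLoop string i with
  | case1 i hle hTTTT =>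
    -- window matched: the next four chars are T's
    have h4 : (string.toList.drop i).take 4 = ['T', 'T', 'T', 'T'] := by
      rw [← gulp_toList, hTTTT]; rfl
    cases hd : string.toList.drop i with
    | nil => rw [hd] at h4; simp at h4
    | cons c t =>
      rw [hd] at h4
      simp only [List.take_succ_cons, List.cons.injEq] at h4
      simp [pvF, h4.1, h4.2]
  | case2 i hle hTTTT ih =>
    have h4 : (string.toList.drop i).take 4 ≠ ['T', 'T', 'T', 'T'] := by
      intro h
      apply hTTTT
      have : (gulp string (i : Int) 4).toList = ("TTTT" : String).toList := by
        rw [gulp_toList, h]; rfl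
      exact String.toList_inj.mp this
    rw [ih]
    have hlen : i + 4 ≤ string.toList.length := by
      simp only [PySem.Str.len_eq] at hle; omega
    cases hd : string.toList.drop i with
    | nil =>
      exfalso
      have := congrArg List.length hd
      simp only [List.length_drop, String.length_toList] at this hlen
      simp at this
      omega
    | cons c t =>
      have hdrop : string.toList.drop (i + 1) = t := by
        rw [← List.drop_drop, hd]; rfl
      rw [hdrop]
      simp only [pvF]
      rw [if_neg]
      intro ⟨h1, h3⟩
      apply h4
      rw [hd, List.take_succ_cons, h1, h3]
  | case3 i hle =>
    rw [pvF_of_short]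
    simp only [PySem.Str.len_eq] at hle
    simp only [List.length_drop, String.length_toList] at *
    omega

theorem polyTAltLoop_eq_pvF (l : List Char) (count : Nat) (hc : count ≤ 3) :
    polyTAltLoop l count = pvF (List.replicate count 'T' ++ l) := by
  induction l generalizing count with
  | nil =>
    rw [pvF_of_short]
    · rfl
    · simp; omega
  | cons c t ih =>
    by_cases hT : c = 'T'
    · subst hT
      by_cases h4 : count + 1 = 4
      · -- count = 3: four T's in a row
        have : count = 3 := by omega
        subst this
        simp [polyTAltLoop, pvF, List.replicate]
      · have : List.replicate count 'T' ++ 'T' :: t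
              = List.replicate (count + 1) 'T' ++ t := by
          rw [List.replicate_succ']; simp
        rw [this, ← ih (count + 1) (by omega)]
        simp [polyTAltLoop, h4]
    · -- a non-'T' resets the counter; the pending T-run (length ≤ 3) can never complete
      have hskip : ∀ n ≤ 3, pvF (List.replicate n 'T' ++ c :: t) = pvF t := by
        intro n hn
        interval_cases n <;> simp [pvF, List.replicate, hT]
      have h0 := ih 0 (by omega)
      simp only [List.replicate, List.nil_append] at h0
      rw [hskip count hc, ← h0]
      simp [polyTAltLoop, hT]

-- ===== VERDICT (by name: the statement is the Claim_ definition above) =====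
theorem polyT_spec : Claim_equal_polyT := by
  intro string _
  unfold Spec_polyT polyT polyT_alt
  rw [polyTLoop_eq_pvF, polyTAltLoop_eq_pvF _ 0 (by omega)]
  simp
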